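-- pv_equiv track=rewrite | github.com/JK0201/Algorithm | 프로그래머스/0/181932. 코드 처리하기/코드 처리하기.py | solution
-- ===== SOURCE A (Python) =====
-- def solution(code):
--     answer = ''
--     mode = False
--     i = 0
--
--     while i < len(code):
--         if code[i] == "1":
--             mode = not mode
--
--         else :
--             if not mode and i % 2 == 0:
--                 answer += code[i]
--
--             elif mode and i % 2 != 0:
--                 answer += code[i]
--         i += 1
--
--     if not answer:
--         return "EMPTY"
--
--     return answer
-- ===== SOURCE B (Python) =====
-- def solution(code):
--     # Split on '1' into segments; segment k's chars sit at global offsets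
--     # off..off+len-1 and the mode there is (k % 2 == 1), so the kept chars of
--     # the segment are exactly the stride-2 slice starting at (k + off) % 2.
--     parts = []
--     offset = 0
--     for k, seg in enumerate(code.split("1")):
--         parts.append(seg[(k + offset) % 2 :: 2])
--         offset += len(seg) + 1
--     return "".join(parts) or "EMPTY"
-- ===== Notes on version B (the rewrite author's own statement) =====
-- stated objective: alternative
-- what changed: Instead of A's char-by-char scan with a toggling mode flag and repeated string concatenation, B splits the code on '1' into segments and, for each segment, appends the stride-2 slice starting at (segment-index + segment-offset) % 2, joining the pieces at the end.
import Mathlib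
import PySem

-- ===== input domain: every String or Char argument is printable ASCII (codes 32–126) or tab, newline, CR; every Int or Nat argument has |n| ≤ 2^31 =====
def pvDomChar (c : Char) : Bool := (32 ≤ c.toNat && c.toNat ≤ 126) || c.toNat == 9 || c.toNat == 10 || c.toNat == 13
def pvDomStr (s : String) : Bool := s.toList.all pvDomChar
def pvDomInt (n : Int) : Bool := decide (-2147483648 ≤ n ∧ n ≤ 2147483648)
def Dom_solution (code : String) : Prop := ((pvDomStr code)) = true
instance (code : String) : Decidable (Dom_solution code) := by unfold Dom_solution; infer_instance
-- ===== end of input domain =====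

-- B replaces A's char-by-char mode-toggling scan by splitting the code on '1'
-- into segments and emitting a stride-2 slice of each segment (objective: alternative).

-- ===== PORT A =====
-- A's while loop: index i, toggling flag `mode`, accumulating into `answer`.
def solnGoA : List Char → Nat → Bool → String → String
  | [], _, _, ans => ans
  | c :: rest, i, mode, ans =>
    if c = '1' then solnGoA rest (i + 1) (!mode) ans
    else if !mode ∧ i % 2 = 0 then solnGoA rest (i + 1) mode (ans.push c)
    else if mode ∧ i % 2 ≠ 0 then solnGoA rest (i + 1) mode (ans.push c)
    else solnGoA rest (i + 1) mode ans

def solution (code : String) : String :=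
  let answer := solnGoA code.toList 0 false ""
  if answer = "" then "EMPTY" else answer

-- ===== PORT B =====
-- exact hand port of code.split("1") on the char list (single non-empty separator)
def splitOn1 : List Char → List (List Char)
  | [] => [[]]
  | c :: rest =>
    if c = '1' then [] :: splitOn1 rest
    else
      match splitOn1 rest with
      | [] => [[c]]          -- unreachable: splitOn1 never returns []
      | h :: t => (c :: h) :: t

-- exact hand port of the stride-2 slice seg[s::2] (applied after dropping s)
def takeEvery2 : List Char → List Char
  | [] => []
  | [c] => [c]
  | c :: _ :: rest => c :: takeEvery2 rest

-- B's for loop over enumerate(code.split("1")) with the running offset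
def solnSegs : List (List Char) → Nat → Nat → List (List Char)
  | [], _, _ => []
  | seg :: rest, k, off =>
    takeEvery2 (seg.drop ((k + off) % 2)) :: solnSegs rest (k + 1) (off + seg.length + 1)

def solution_alt (code : String) : String :=
  let parts := solnSegs (splitOn1 code.toList) 0 0
  let answer := String.ofList parts.flatten
  if answer = "" then "EMPTY" else answer

-- ===== PRECONDITION & SPEC =====
def Spec_solution (code : String) (out : String) : Prop := out = solution_alt code
instance (code : String) (out : String) : Decidable (Spec_solution code out) := by
  unfold Spec_solution; infer_instance

-- ===== CLAIM =====
def Claim_equal_solution : Prop :=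
  ∀ (code : String), Dom_solution code → Spec_solution code (solution code)

-- ===== LEMMAS AND PROOFS =====

theorem splitOn1_ne_nil (cs : List Char) : splitOn1 cs ≠ [] := by
  cases cs with
  | nil => simp [splitOn1]
  | cons c rest =>
    simp only [splitOn1]
    split_ifs
    · simp
    · cases h : splitOn1 rest <;> simp

theorem takeEvery2_cons (c : Char) (h : List Char) :
    takeEvery2 (c :: h) = c :: takeEvery2 (h.drop 1) := by
  cases h <;> simp [takeEvery2]

theorem push_ofList_cons (ans : String) (c : Char) (l : List Char) :
    ans.push c ++ String.ofList l = ans ++ String.ofList (c :: l) := by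
  apply String.ext; simp

-- B's head step on a non-'1' character: the first segment either emits c (when
-- the segment-start parity matches) or skips it, then continues as if starting
-- one position later.
theorem segs_cons (c : Char) (hc : c ≠ '1') (rest : List Char) (k off : Nat) :
    (solnSegs (splitOn1 (c :: rest)) k off).flatten
      = (if (k + off) % 2 = 0 then [c] else [])
        ++ (solnSegs (splitOn1 rest) k (off + 1)).flatten := by
  obtain ⟨h, t, hsplit⟩ : ∃ h t, splitOn1 rest = h :: t := by
    cases hs : splitOn1 rest with
    | nil => exact absurd hs (splitOn1_ne_nil rest)
    | cons h t => exact ⟨h, t, rfl⟩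
  simp only [splitOn1, if_neg hc, hsplit, solnSegs, List.flatten_cons, List.length_cons]
  have hoff : off + (h.length + 1) + 1 = off + 1 + h.length + 1 := by omega
  rw [hoff]
  by_cases hp : (k + off) % 2 = 0
  · have hp1 : (k + (off + 1)) % 2 = 1 := by omega
    rw [hp, hp1]
    simp [takeEvery2_cons]
  · have hp1 : (k + off) % 2 = 1 := by omega
    have hp0 : (k + (off + 1)) % 2 = 0 := by omega
    rw [hp1, hp0]
    simp

-- Main invariant: A's loop from index i with mode m equals the accumulator plus
-- B's segment walk, whenever i and off agree mod 2 and m is the parity of k.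
theorem goA_eq_segs (cs : List Char) :
    ∀ (i k off : Nat) (m : Bool) (ans : String),
      i % 2 = off % 2 → m = decide (k % 2 = 1) →
      solnGoA cs i m ans = ans ++ String.ofList (solnSegs (splitOn1 cs) k off).flatten := by
  induction cs with
  | nil => intro i k off m ans _ _; simp [solnGoA, splitOn1, solnSegs, takeEvery2]
  | cons c rest ih =>
    intro i k off m ans hio hm
    by_cases hc : c = '1'
    · subst hc
      have : solnGoA ('1' :: rest) i m ans = solnGoA rest (i + 1) (!m) ans := by
        simp [solnGoA]
      rw [this, ih (i + 1) (k + 1) (off + 1) (!m) ans (by omega)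
            (by subst hm; rcases Nat.even_or_odd k with h | h <;>
                simp [Nat.even_iff, Nat.odd_iff] at h <;> simp [h] <;> omega)]
      simp [splitOn1, solnSegs, takeEvery2]
    · rw [segs_cons c hc rest k off]
      by_cases hp : (k + off) % 2 = 0
      · -- character kept: i % 2 matches the mode
        have hkeep : solnGoA (c :: rest) i m ans = solnGoA rest (i + 1) m (ans.push c) := by
          subst hm
          rcases Nat.even_or_odd k with h | h <;>
            simp [Nat.even_iff, Nat.odd_iff] at h <;>
            simp [solnGoA, hc, h] <;> omega
        rw [hkeep, ih (i + 1) k (off + 1) m (ans.push c) (by omega) hm]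
        simp [push_ofList_cons, hp]
      · -- character skipped
        have hskip : solnGoA (c :: rest) i m ans = solnGoA rest (i + 1) m ans := by
          subst hm
          rcases Nat.even_or_odd k with h | h <;>
            simp [Nat.even_iff, Nat.odd_iff] at h <;>
            simp [solnGoA, hc, h] <;> omega
        rw [hskip, ih (i + 1) k (off + 1) m ans (by omega) hm]
        simp [hp]

-- ===== VERDICT =====
theorem solution_spec : Claim_equal_solution := by
  intro code _
  unfold Spec_solution solution solution_alt
  rw [goA_eq_segs code.toList 0 0 0 false "" rfl (by simp)]
  simp
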